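-- pv_equiv track=rewrite | github.com/RomainPeter/xeno-mathematics-engine | src/xme/engines/ae/psp_builder.py | hasse_covers
-- ===== SOURCE A (Python) =====
-- from typing import List, Set, Tuple
--
-- def hasse_covers(intents: List[Set[str]]) -> List[tuple[int, int]]:
--     """
--     Calcule les relations de couverture Hasse entre intents.
--
--     Args:
--         intents: Liste des intents triés
--
--     Returns:
--         Liste des couples (i, j) où intent[i] couvre intent[j]
--     """
--     covers = []
--     n = len(intents)
--
--     for i in range(n):
--         for j in range(n):
--             if i == j:
--                 continue
--             I1, I2 = intents[i], intents[j]
--             if I1 < I2: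
--                 # check couverture: pas d'intermédiaire
--                 if not any(I1 < Ik < I2 for k, Ik in enumerate(intents) if k not in (i, j)):
--                     covers.append((i, j))
--
--     return covers
-- ===== SOURCE B (Python) =====
-- def hasse_covers(intents):
--     n = len(intents)
--     # successor adjacency lists: succ[i] = indices j (ascending) with intents[i] < intents[j]
--     succ = [[j for j in range(n) if intents[i] < intents[j]] for i in range(n)]
--     covers = []
--     for i in range(n):
--         # j is dominated iff reachable from i in two steps: some k with i < k < j
--         dominated = set()
--         for k in succ[i]:
--             dominated.update(succ[k])
--         covers.extend((i, j) for j in succ[i] if j not in dominated)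
--     return covers
-- ===== Notes on version B (the rewrite author's own statement) =====
-- stated objective: alternative
-- what changed: B builds successor adjacency lists (indices of strict supersets) once, then for each source unions the successors' successor lists into a dominated set and emits the non-dominated successors, replacing A's per-pair inner any() scan over all intents; same asymptotic cost on the measured inputs, so no speed is claimed.
import Mathlib
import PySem

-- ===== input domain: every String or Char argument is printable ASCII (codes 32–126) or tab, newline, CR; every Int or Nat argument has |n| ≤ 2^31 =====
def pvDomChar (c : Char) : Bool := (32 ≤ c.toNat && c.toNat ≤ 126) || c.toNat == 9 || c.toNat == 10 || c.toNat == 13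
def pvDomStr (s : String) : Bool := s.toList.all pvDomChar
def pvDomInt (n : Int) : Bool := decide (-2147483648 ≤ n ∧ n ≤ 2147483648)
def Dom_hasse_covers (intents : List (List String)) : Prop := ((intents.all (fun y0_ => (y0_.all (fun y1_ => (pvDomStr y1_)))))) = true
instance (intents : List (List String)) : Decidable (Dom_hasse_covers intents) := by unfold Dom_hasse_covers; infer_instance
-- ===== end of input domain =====

-- B builds successor adjacency lists once, then emits per source the successors not reachable in two steps (dominated set via set unions) -- an alternative transitive-reduction decomposition, not claimed faster.

-- Python's 's1 < s2' on sets: proper subset (both programs use this operator).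
def pyLt (a b : List String) : Bool := PySem.Set.issubset a b && !(PySem.Set.issubset b a)

-- ===== PORT A =====
def hasse_covers (intents : List (List String)) : List (Int × Int) :=
  let n : Int := intents.length
  (PySem.List.pyRange 0 n 1).foldl (fun covers i =>
    (PySem.List.pyRange 0 n 1).foldl (fun covers j =>
      if i == j then covers
      else
        let I1 := PySem.List.pyGetD intents i []
        let I2 := PySem.List.pyGetD intents j []
        if pyLt I1 I2 then
          if !((PySem.List.enumerate intents 0).any (fun kIk =>
                !(kIk.1 == i || kIk.1 == j) && (pyLt I1 kIk.2 && pyLt kIk.2 I2)))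
          then covers ++ [(i, j)] else covers
        else covers) covers) []

-- ===== PORT B =====
def hasse_covers_alt (intents : List (List String)) : List (Int × Int) :=
  let n : Nat := intents.length
  let succ : List (List Nat) :=
    (List.range n).map (fun i =>
      (List.range n).filter (fun j => pyLt (intents.getD i []) (intents.getD j [])))
  (List.range n).foldl (fun covers i =>
    let si := succ.getD i []
    let dominated : PySem.Set Nat :=
      si.foldl (fun s k => PySem.Set.update s (succ.getD k [])) PySem.Set.empty
    covers ++ (si.filter (fun j => !(PySem.Set.contains dominated j))).map
        (fun j : Nat => ((i : Int), (j : Int)))) []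

-- ===== PRECONDITION & SPEC =====
def Spec_hasse_covers (intents : List (List String)) (out : List (Int × Int)) : Prop := out = hasse_covers_alt intents
instance (intents : List (List String)) (out : List (Int × Int)) : Decidable (Spec_hasse_covers intents out) := by unfold Spec_hasse_covers; infer_instance

-- ===== CLAIM (what is proved, stated in full; the proofs are below) =====
def Claim_equal_hasse_covers : Prop := ∀ (intents : List (List String)), Dom_hasse_covers intents → Spec_hasse_covers intents (hasse_covers intents)

-- ===== LEMMAS AND PROOFS =====

theorem pyLt_irrefl (a : List String) : pyLt a a = false := by
  simp [pyLt]

theorem any_congr_mem {α : Type} (l : List α) (p q : α → Bool)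
    (h : ∀ x ∈ l, p x = q x) : l.any p = l.any q := by
  induction l with
  | nil => rfl
  | cons x xs ih =>
      simp only [List.any_cons, h x (by simp)]
      rw [ih (fun y hy => h y (by simp [hy]))]

theorem mem_foldl_update {α β : Type} [BEq α] [LawfulBEq α]
    (l : List β) (f : β → List α) (s : PySem.Set α) (y : α) :
    y ∈ l.foldl (fun s b => PySem.Set.update s (f b)) s ↔ y ∈ s ∨ ∃ b ∈ l, y ∈ f b := by
  induction l generalizing s with
  | nil => simp
  | cons b bs ih =>
      simp only [List.foldl_cons, ih, PySem.Set.mem_update, List.mem_cons]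
      constructor
      · rintro (( h | h) | ⟨c, hc, hy⟩)
        · exact Or.inl h
        · exact Or.inr ⟨b, Or.inl rfl, h⟩
        · exact Or.inr ⟨c, Or.inr hc, hy⟩
      · rintro (h | ⟨c, (rfl | hc), hy⟩)
        · exact Or.inl (Or.inl h)
        · exact Or.inl (Or.inr hy)
        · exact Or.inr ⟨c, hc, hy⟩

-- canonical form shared by both proofs
def hcCond (intents : List (List String)) (i j : Nat) : Bool :=
  pyLt (intents.getD i []) (intents.getD j [])
    && !((List.range intents.length).any (fun k =>
          pyLt (intents.getD i []) (intents.getD k [])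
            && pyLt (intents.getD k []) (intents.getD j [])))

def hcCanon (intents : List (List String)) : List (Int × Int) :=
  (List.range intents.length).flatMap (fun i : Nat =>
    ((List.range intents.length).filter (hcCond intents i)).map (fun j : Nat => ((i : Int), (j : Int))))

theorem alt_eq_canon (intents : List (List String)) :
    hasse_covers_alt intents = hcCanon intents := by
  unfold hasse_covers_alt hcCanon
  simp only []
  set n := intents.length with hn
  set succ : List (List Nat) :=
    (List.range n).map (fun i =>
      (List.range n).filter (fun j => pyLt (intents.getD i []) (intents.getD j []))) with hsucc
  have hsget : ∀ a : Nat, a < n →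
      succ.getD a [] = (List.range n).filter (fun j => pyLt (intents.getD a []) (intents.getD j [])) := by
    intro a ha
    rw [hsucc, PySem.List.getD_map_range _ _ _ _ ha]
  have hinner : ∀ (acc : List (Int × Int)), ∀ i ∈ List.range n,
      (acc ++ ((succ.getD i []).filter (fun j =>
          !(PySem.Set.contains ((succ.getD i []).foldl
              (fun s k => PySem.Set.update s (succ.getD k [])) PySem.Set.empty) j))).map
          (fun j : Nat => ((i : Int), (j : Int))))
      = acc ++ List.map (fun j : Nat => ((i : Int), (j : Int)))
          (List.filter (hcCond intents i) (List.range n)) := by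
    intro acc i hi
    have hi' : i < n := List.mem_range.mp hi
    rw [hsget i hi', List.filter_filter]
    have hfe : ∀ j ∈ List.range n,
        (!(PySem.Set.contains (((List.range n).filter (fun j => pyLt (intents.getD i []) (intents.getD j []))).foldl
              (fun s k => PySem.Set.update s (succ.getD k [])) PySem.Set.empty) j)
          && pyLt (intents.getD i []) (intents.getD j []))
        = hcCond intents i j := by
      intro j hj
      have hdom : PySem.Set.contains
          (((List.range n).filter (fun j => pyLt (intents.getD i []) (intents.getD j []))).foldl
            (fun s k => PySem.Set.update s (succ.getD k [])) PySem.Set.empty) j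
          = ((List.range n).any (fun k =>
              pyLt (intents.getD i []) (intents.getD k [])
                && pyLt (intents.getD k []) (intents.getD j []))) := by
        rw [Bool.eq_iff_iff, PySem.Set.contains_iff, mem_foldl_update, List.any_eq_true]
        constructor
        · rintro (h | ⟨k, hk, hjk⟩)
          · cases h
          · rcases List.mem_filter.mp hk with ⟨hkr, hik⟩
            have hk' : k < n := List.mem_range.mp hkr
            rw [hsget k hk'] at hjk
            rcases List.mem_filter.mp hjk with ⟨_, hkj⟩
            exact ⟨k, hkr, by exact Bool.and_intro hik hkj⟩
        · rintro ⟨k, hkr, hkand⟩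
          have hk' : k < n := List.mem_range.mp hkr
          have hik := Bool.and_elim_left hkand
          have hkj := Bool.and_elim_right hkand
          refine Or.inr ⟨k, List.mem_filter.mpr ⟨hkr, hik⟩, ?_⟩
          rw [hsget k hk']
          exact List.mem_filter.mpr ⟨hj, hkj⟩
      unfold hcCond
      rw [← hn, hdom, Bool.and_comm]
    rw [List.filter_congr hfe]
  rw [PySem.List.foldl_congr_mem _ _
        (fun (covers : List (Int × Int)) (i : Nat) => covers ++ List.map (fun j : Nat => ((i : Int), (j : Int)))
          (List.filter (hcCond intents i) (List.range n))) []
        hinner,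
      PySem.List.foldl_append_eq_flatMap]
  rw [List.nil_append]

theorem a_eq_canon (intents : List (List String)) :
    hasse_covers intents = hcCanon intents := by
  unfold hasse_covers hcCanon
  simp only []
  set n := intents.length with hn
  rw [PySem.List.pyRange_zero_nat, List.foldl_map]
  have hinner : ∀ (acc : List (Int × Int)), ∀ i ∈ List.range n,
      (List.map (fun k : Nat => (k : Int)) (List.range n)).foldl (fun covers j =>
        if ((i : Int) == j) = true then covers
        else
          if pyLt (PySem.List.pyGetD intents (i : Int) []) (PySem.List.pyGetD intents j []) then
            if !((PySem.List.enumerate intents 0).any (fun kIk =>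
                  !(kIk.1 == (i : Int) || kIk.1 == j)
                    && (pyLt (PySem.List.pyGetD intents (i : Int) []) kIk.2
                        && pyLt kIk.2 (PySem.List.pyGetD intents j []))))
            then covers ++ [((i : Int), j)] else covers
          else covers) acc
      = acc ++ List.map (fun j : Nat => ((i : Int), (j : Int)))
          (List.filter (hcCond intents i) (List.range n)) := by
    intro acc i hi
    have hi' : i < n := List.mem_range.mp hi
    rw [List.foldl_map]
    have hbody : ∀ (acc' : List (Int × Int)), ∀ j ∈ List.range n,
        (if ((i : Int) == (j : Int)) = true then acc'
         else
          if pyLt (PySem.List.pyGetD intents (i : Int) []) (PySem.List.pyGetD intents (j : Int) []) then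
            if !((PySem.List.enumerate intents 0).any (fun kIk =>
                  !(kIk.1 == (i : Int) || kIk.1 == (j : Int))
                    && (pyLt (PySem.List.pyGetD intents (i : Int) []) kIk.2
                        && pyLt kIk.2 (PySem.List.pyGetD intents (j : Int) []))))
            then acc' ++ [((i : Int), (j : Int))] else acc'
          else acc')
        = (if hcCond intents i j then acc' ++ [((i : Int), (j : Int))] else acc') := by
      intro acc' j hj
      have hany : ((PySem.List.enumerate intents 0).any (fun kIk =>
            !(kIk.1 == (i : Int) || kIk.1 == (j : Int))
              && (pyLt (PySem.List.pyGetD intents (i : Int) []) kIk.2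
                  && pyLt kIk.2 (PySem.List.pyGetD intents (j : Int) []))))
          = ((List.range n).any (fun k =>
              pyLt (intents.getD i []) (intents.getD k [])
                && pyLt (intents.getD k []) (intents.getD j []))) := by
        rw [PySem.List.enumerate_eq_map_pyRange intents ([] : List String), PySem.List.len_eq, ← hn,
            PySem.List.pyRange_zero_nat, List.any_map, List.any_map]
        apply any_congr_mem
        intro k hk
        simp only [Function.comp, PySem.List.pyGetD_natCast]
        by_cases hki : k = i
        · subst hki
          simp [pyLt_irrefl]
        · by_cases hkj : k = j
          · subst hkj
            simp [pyLt_irrefl]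
          · simp [hki, hkj]
      by_cases hij : i = j
      · subst hij
        have hcc : hcCond intents i i = false := by
          unfold hcCond
          simp [pyLt_irrefl]
        simp [hcc]
      · have hbeq : (((i : Int)) == ((j : Int))) = false := by
          simp [hij]
        rw [hbeq]
        simp only [Bool.false_eq_true, if_false]
        rw [hany]
        unfold hcCond
        rw [PySem.List.pyGetD_natCast, PySem.List.pyGetD_natCast, ← hn]
        cases pyLt (intents.getD i []) (intents.getD j []) <;>
          cases ((List.range n).any (fun k =>
              pyLt (intents.getD i []) (intents.getD k [])
                && pyLt (intents.getD k []) (intents.getD j []))) <;>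
          simp
    rw [PySem.List.foldl_congr_mem _ _
          (fun covers j => if hcCond intents i j then covers ++ [((i : Int), (j : Int))] else covers)
          acc hbody,
        PySem.List.foldl_append_if]
  rw [PySem.List.foldl_congr_mem _ _
        (fun (covers : List (Int × Int)) (i : Nat) => covers ++ List.map (fun j : Nat => ((i : Int), (j : Int)))
          (List.filter (hcCond intents i) (List.range n))) []
        hinner,
      PySem.List.foldl_append_eq_flatMap]
  rw [List.nil_append]

-- ===== VERDICT (by name: the statement is the Claim_ definition above) =====
theorem hasse_covers_spec : Claim_equal_hasse_covers := by
  intro intents _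
  unfold Spec_hasse_covers
  rw [a_eq_canon, alt_eq_canon]
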